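-- pv_equiv track=rewrite | github.com/thoth-station/kebechet | kebechet/managers/initialization/util.py | __get_slug_from_url
-- ===== SOURCE A (Python) =====
-- class SlugNotFoundException(Exception):
--     """Exception raised when no slug is found."""
--
--     pass
--
-- def __get_slug_from_url(url: str) -> str:
--     slug_slash = False
--
--     for i in range(len(url) - 1, 0, -1):
--         if not slug_slash and url[i] == "/":
--             slug_slash = True
--         elif url[i] in ["/", ":"]:
--             return url[i + 1:]
--
--     raise SlugNotFoundException
-- ===== SOURCE B (Python) =====
-- class SlugNotFoundException(Exception):
--     """Exception raised when no slug is found."""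
--
--     pass
--
--
-- def __get_slug_from_url(url: str) -> str:
--     last = url.rfind("/")
--     second = url.rfind("/", 0, last) if last != -1 else -1
--     colon = url.rfind(":")
--     boundary = max(second, colon)
--     if boundary >= 1:
--         return url[boundary + 1:]
--     raise SlugNotFoundException
-- ===== Notes on version B (the rewrite author's own statement) =====
-- stated objective: simpler
-- what changed: Replaces the backward character-by-character scan with a seen-slash flag by three stdlib string searches (rfind of the last slash, rfind of a slash before it, rfind of the last colon) and taking the larger of the two candidate boundaries; Pre_ excludes exactly the inputs where A raises SlugNotFoundException (B raises it there too).
import Mathlib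
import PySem

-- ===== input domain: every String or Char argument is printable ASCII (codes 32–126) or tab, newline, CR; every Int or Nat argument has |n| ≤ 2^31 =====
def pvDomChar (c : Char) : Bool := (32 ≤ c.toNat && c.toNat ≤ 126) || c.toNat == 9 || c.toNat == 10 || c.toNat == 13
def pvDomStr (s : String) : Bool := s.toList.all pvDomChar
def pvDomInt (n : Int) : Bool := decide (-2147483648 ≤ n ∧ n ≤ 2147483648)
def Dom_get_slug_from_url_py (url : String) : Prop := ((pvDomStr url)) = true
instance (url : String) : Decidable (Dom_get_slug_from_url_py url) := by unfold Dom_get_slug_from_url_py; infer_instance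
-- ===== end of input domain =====

-- B replaces A's backward character scan (with a seen-slash flag) by three rfind string
-- searches and a max of the two candidate boundaries — simpler, same O(n) cost.

-- ===== PORT A =====
-- A's loop: i runs len(url)-1, …, 1; `flag` is slug_slash; `none` = SlugNotFoundException.
-- url[i] is always in range (1 ≤ i ≤ len-1), so pyGet? never returns none; .getD ' ' is exact.
def aLoop (cs : List Char) (i : Nat) (flag : Bool) : Option (List Char) :=
  if i = 0 then none
  else
    let c := (PySem.List.pyGet? cs (i : Int)).getD ' '
    if !flag && (c == '/') then aLoop cs (i - 1) true
    else if c == '/' || c == ':' then some (PySem.Chars.slice cs (some ((i : Int) + 1)) none)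
    else aLoop cs (i - 1) flag
termination_by i

def get_slug_from_url_py (url : String) : String :=
  match aLoop url.toList (url.toList.length - 1) false with
  | some r => String.ofList r
  | none => ""   -- raise SlugNotFoundException: excluded by Pre_

-- ===== PORT B =====
def get_slug_from_url_py_alt (url : String) : String :=
  let last := PySem.Str.rfind url "/"
  let second := if last ≠ -1 then PySem.Str.rfindFrom url "/" 0 (some last) else -1
  let colon := PySem.Str.rfind url ":"
  let boundary := max second colon
  if 1 ≤ boundary then String.ofList (PySem.Chars.slice url.toList (some (boundary + 1)) none)
  else ""   -- raise SlugNotFoundException: excluded by Pre_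

-- ===== PRECONDITION & SPEC =====
-- there is a slash strictly right of index k
abbrev slashAbove (cs : List Char) (k : Nat) : Prop := ∃ j ≤ cs.length, k < j ∧ cs[j]? = some '/'
-- A's loop returns at index k: a colon, or a slash with another slash to its right
abbrev goodAt (cs : List Char) (k : Nat) : Prop :=
  cs[k]? = some ':' ∨ (cs[k]? = some '/' ∧ slashAbove cs k)
abbrev goodIdx (cs : List Char) (k : Nat) : Prop := 1 ≤ k ∧ goodAt cs k

-- Exactly the inputs on which A returns (on all others both A and B raise SlugNotFoundException).
def Pre_get_slug_from_url_py (url : String) : Prop :=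
  ∃ k ≤ url.toList.length, goodIdx url.toList k
instance (url : String) : Decidable (Pre_get_slug_from_url_py url) := by
  unfold Pre_get_slug_from_url_py; infer_instance

def pvWitness_get_slug_from_url_py : String := "https://github.com/a/b"

def Spec_get_slug_from_url_py (url : String) (out : String) : Prop := out = get_slug_from_url_py_alt url
instance (url : String) (out : String) : Decidable (Spec_get_slug_from_url_py url out) := by
  unfold Spec_get_slug_from_url_py; infer_instance

-- ===== CLAIM (what is proved, stated in full; the proofs are below) =====
def Claim_equal_get_slug_from_url_py : Prop := ∀ (url : String), Dom_get_slug_from_url_py url → Pre_get_slug_from_url_py url → Spec_get_slug_from_url_py url (get_slug_from_url_py url)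

-- ===== LEMMAS AND PROOFS =====

lemma singleton_prefix_iff (l : List Char) (c : Char) : [c] <+: l ↔ l[0]? = some c := by
  cases l <;> simp [List.cons_prefix_cons, eq_comm]

lemma singleton_prefix_drop_iff (cs : List Char) (c : Char) (j : Nat) :
    [c] <+: cs.drop j ↔ cs[j]? = some c := by
  rw [singleton_prefix_iff]; simp

lemma rfind_go_single (cs : List Char) (c : Char) (k : Nat) :
    PySem.Chars.rfind.go cs [c] k =
      if ∃ j ≤ k, cs[j]? = some c
      then ((Nat.findGreatest (fun j => cs[j]? = some c) k : Nat) : Int) else -1 := by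
  induction k with
  | zero =>
    have h0 : PySem.Chars.rfind.go cs [c] 0 = if [c].isPrefixOf cs = true then 0 else -1 := by
      simp [PySem.Chars.rfind.go]
    rw [h0]
    by_cases h : cs[0]? = some c
    · simp [List.isPrefixOf_iff_prefix, singleton_prefix_iff, h]
    · simp [List.isPrefixOf_iff_prefix, singleton_prefix_iff, h]
  | succ k ih =>
    have hstep : PySem.Chars.rfind.go cs [c] (k+1) =
        if [c].isPrefixOf (cs.drop (k+1)) = true then ((k:Int)+1)
        else PySem.Chars.rfind.go cs [c] k := by
      simp [PySem.Chars.rfind.go]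
    rw [hstep, ih]
    by_cases h : cs[k+1]? = some c
    · have hex : ∃ j ≤ k+1, cs[j]? = some c := ⟨k+1, le_refl _, h⟩
      rw [if_pos (by rw [List.isPrefixOf_iff_prefix, singleton_prefix_drop_iff]; exact h),
        if_pos hex, Nat.findGreatest_succ, if_pos h]
      push_cast; ring
    · have hiff : (∃ j ≤ k+1, cs[j]? = some c) ↔ (∃ j ≤ k, cs[j]? = some c) := by
        constructor
        · rintro ⟨j, hj, hjc⟩
          rcases Nat.lt_or_ge j (k+1) with hlt | hge
          · exact ⟨j, Nat.lt_succ_iff.mp hlt, hjc⟩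
          · exact absurd hjc (by have : j = k+1 := le_antisymm hj hge; simp [this, h])
        · rintro ⟨j, hj, hjc⟩; exact ⟨j, Nat.le_succ_of_le hj, hjc⟩
      rw [if_neg (by rw [List.isPrefixOf_iff_prefix, singleton_prefix_drop_iff]; exact h),
        Nat.findGreatest_succ, if_neg h]
      by_cases hx : ∃ j ≤ k, cs[j]? = some c
      · rw [if_pos hx, if_pos (hiff.mpr hx)]
      · rw [if_neg hx, if_neg (fun hh => hx (hiff.mp hh))]

lemma rfind_single (cs : List Char) (c : Char) :
    PySem.Chars.rfind cs [c] =
      if ∃ j ≤ cs.length, cs[j]? = some c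
      then ((Nat.findGreatest (fun j => cs[j]? = some c) cs.length : Nat) : Int) else -1 := by
  simpa [PySem.Chars.rfind] using rfind_go_single cs c cs.length

lemma rfindFrom_zero_take (cs : List Char) (c : Char) (L : Nat) (hL : L ≤ cs.length) :
    PySem.Chars.rfindFrom cs [c] 0 (some (L : Int)) = PySem.Chars.rfind (cs.take L) [c] := by
  have h1 : ¬((cs.length : Int) < (L : Int)) := by exact_mod_cast not_lt.mpr hL
  have h2 : ¬((L : Int) < 0) := by omega
  simp [PySem.Chars.rfindFrom, h1, h2]
  exact fun h => h.symm

lemma exFG_iff (P : Nat → Prop) [DecidablePred P] (i : Nat) (hP : ¬ P (i+1)) :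
    ((∃ k ≤ i+1, P k) ↔ (∃ k ≤ i, P k)) := by
  constructor
  · rintro ⟨k, hk, hkP⟩
    rcases Nat.lt_or_ge k (i+1) with hlt | hge
    · exact ⟨k, Nat.lt_succ_iff.mp hlt, hkP⟩
    · exact absurd hkP (by have : k = i+1 := le_antisymm hk hge; simpa [this] using hP)
  · rintro ⟨k, hk, hkP⟩; exact ⟨k, Nat.le_succ_of_le hk, hkP⟩

lemma aLoop_spec (cs : List Char) (i : Nat) (hi : i < cs.length)
    (flag : Bool) (hflag : flag = true ↔ slashAbove cs i) :
    aLoop cs i flag =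
      if ∃ k ≤ i, goodIdx cs k
      then some (cs.drop (Nat.findGreatest (goodIdx cs) i + 1)) else none := by
  induction i generalizing flag with
  | zero =>
    rw [aLoop, if_pos rfl, if_neg]
    rintro ⟨k, hk, h1, -⟩; omega
  | succ i ih =>
    have hx : cs[i+1]? = some cs[i+1] := List.getElem?_eq_getElem hi
    have hslice : PySem.Chars.slice cs (some (((i+1 : Nat) : Int) + 1)) none = cs.drop (i+2) := by
      rw [PySem.Chars.slice_eq_listSlice, PySem.List.slice_from cs (by omega)]
      have h2 : ((((i+1 : Nat) : Int)) + 1).toNat = i + 2 := by omega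
      rw [h2]
    have hstep : aLoop cs (i+1) flag =
        if !flag && (cs[i+1] == '/') then aLoop cs i true
        else if cs[i+1] == '/' || cs[i+1] == ':' then some (cs.drop (i+2))
        else aLoop cs i flag := by
      rw [aLoop, if_neg (by omega)]
      simp only [PySem.List.pyGet?_natCast, hx, Option.getD_some, Nat.add_sub_cancel, hslice]
    rw [hstep]
    by_cases hsl : cs[i+1] = '/'
    · by_cases hfl : flag = true
      · -- slug_slash already set and url[i] == '/': return url[i+1:]
        have hgood : goodIdx cs (i+1) := ⟨by omega, Or.inr ⟨hsl ▸ hx, hflag.mp hfl⟩⟩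
        rw [if_neg (by simp [hfl]), if_pos (by simp [hsl]),
          if_pos ⟨i+1, le_refl _, hgood⟩, Nat.findGreatest_succ, if_pos hgood]
      · -- first '/' seen from the right: set slug_slash and continue
        have hfl' : flag = false := by simpa using hfl
        have hnsa : ¬ slashAbove cs (i+1) := fun h => hfl (hflag.mpr h)
        have hngood : ¬ goodIdx cs (i+1) := by
          rintro ⟨-, hc | ⟨-, hsa⟩⟩
          · rw [hx] at hc; simp [hsl] at hc
          · exact hnsa hsa
        have hsa_i : slashAbove cs i := ⟨i+1, by omega, by omega, hsl ▸ hx⟩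
        rw [if_pos (by simp [hfl', hsl]), ih (by omega) true (by simp [hsa_i])]
        by_cases hex : ∃ k ≤ i, goodIdx cs k
        · rw [if_pos hex, if_pos ((exFG_iff _ _ hngood).mpr hex), Nat.findGreatest_succ,
            if_neg hngood]
        · rw [if_neg hex, if_neg (fun hh => hex ((exFG_iff _ _ hngood).mp hh))]
    · by_cases hco : cs[i+1] = ':'
      · -- a colon: return url[i+1:]
        have hgood : goodIdx cs (i+1) := ⟨by omega, Or.inl (hco ▸ hx)⟩
        rw [if_neg (by simp [hsl]), if_pos (by simp [hco]),
          if_pos ⟨i+1, le_refl _, hgood⟩, Nat.findGreatest_succ, if_pos hgood]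
      · -- an ordinary character: continue
        have hngood : ¬ goodIdx cs (i+1) := by
          rintro ⟨-, hc | ⟨hc, -⟩⟩
          · rw [hx] at hc; exact hco (by simpa using hc)
          · rw [hx] at hc; exact hsl (by simpa using hc)
        have hiff : (flag = true) ↔ slashAbove cs i := by
          rw [hflag]
          constructor
          · rintro ⟨j, hj, hij, hjs⟩; exact ⟨j, hj, by omega, hjs⟩
          · rintro ⟨j, hj, hij, hjs⟩
            refine ⟨j, hj, ?_, hjs⟩
            rcases Nat.lt_or_ge (i+1) j with h | h
            · exact h
            · exfalso
              have : j = i+1 := by omega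
              rw [this, hx] at hjs; exact hsl (by simpa using hjs)
        rw [if_neg (by simp [hsl]), if_neg (by simp [hsl, hco]), ih (by omega) flag hiff]
        by_cases hex : ∃ k ≤ i, goodIdx cs k
        · rw [if_pos hex, if_pos ((exFG_iff _ _ hngood).mpr hex), Nat.findGreatest_succ,
            if_neg hngood]
        · rw [if_neg hex, if_neg (fun hh => hex ((exFG_iff _ _ hngood).mp hh))]

lemma goodIdx_lt (cs : List Char) (k : Nat) (h : goodIdx cs k) : k < cs.length := by
  rcases h.2 with hc | ⟨hc, -⟩ <;> exact (List.getElem?_eq_some_iff.mp hc).1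

-- B's boundary is exactly the index at which A's loop returns.
lemma boundary_eq (cs : List Char) (h : ∃ k ≤ cs.length, goodIdx cs k) :
    max (if PySem.Chars.rfind cs ['/'] ≠ -1
         then PySem.Chars.rfindFrom cs ['/'] 0 (some (PySem.Chars.rfind cs ['/'])) else -1)
        (PySem.Chars.rfind cs [':'])
      = ((Nat.findGreatest (goodIdx cs) cs.length : Nat) : Int) := by
  obtain ⟨k, hk, hkgood⟩ := h
  set K := Nat.findGreatest (goodIdx cs) cs.length with hK
  have hKgood : goodIdx cs K := Nat.findGreatest_spec hk hkgood
  have hK1 : 1 ≤ K := hKgood.1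
  have hKlt : K < cs.length := goodIdx_lt _ _ hKgood
  have hKmax : ∀ j, K < j → j ≤ cs.length → ¬ goodIdx cs j :=
    fun j h1 h2 => Nat.findGreatest_is_greatest h1 h2
  have hcol_le : PySem.Chars.rfind cs [':'] ≤ (K : Int) := by
    rw [rfind_single]
    split_ifs with hex
    · obtain ⟨j, hj, hjc⟩ := hex
      have hCc : cs[Nat.findGreatest (fun j => cs[j]? = some ':') cs.length]? = some ':' :=
        Nat.findGreatest_spec (P := fun j => cs[j]? = some ':') hj hjc
      have hCn : Nat.findGreatest (fun j => cs[j]? = some ':') cs.length ≤ cs.length :=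
        Nat.findGreatest_le cs.length
      by_contra hcon
      rw [not_le] at hcon
      have hKC : K < Nat.findGreatest (fun j => cs[j]? = some ':') cs.length := by
        exact_mod_cast hcon
      exact hKmax _ hKC hCn ⟨by omega, Or.inl hCc⟩
    · omega
  by_cases hS : ∃ j ≤ cs.length, cs[j]? = some '/'
  · -- there is a slash: last = its greatest index L
    obtain ⟨j0, hj0, hj0s⟩ := hS
    set L := Nat.findGreatest (fun j => cs[j]? = some '/') cs.length with hL
    have hLs : cs[L]? = some '/' :=
      Nat.findGreatest_spec (P := fun j => cs[j]? = some '/') hj0 hj0s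
    have hLn : L < cs.length := (List.getElem?_eq_some_iff.mp hLs).1
    have hlast : PySem.Chars.rfind cs ['/'] = (L : Int) := by
      rw [rfind_single, if_pos ⟨j0, hj0, hj0s⟩]
    have hne : ((L : Int) ≠ -1) := by omega
    rw [hlast, if_pos hne, rfindFrom_zero_take cs '/' L (by omega)]
    have htlen : (cs.take L).length = L := by simp [List.length_take]; omega
    have htake : ∀ m : Nat, (cs.take L)[m]? = some '/' ↔ (m < L ∧ cs[m]? = some '/') := by
      intro m; rw [List.getElem?_take]
      split_ifs with hm <;> simp [hm]
    have hsec_le : PySem.Chars.rfind (cs.take L) ['/'] ≤ (K : Int) := by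
      rw [rfind_single]
      split_ifs with hex2
      · obtain ⟨j, hj, hjc⟩ := hex2
        have hSs : (cs.take L)[Nat.findGreatest (fun j => (cs.take L)[j]? = some '/')
            (cs.take L).length]? = some '/' :=
          Nat.findGreatest_spec (P := fun j => (cs.take L)[j]? = some '/') hj hjc
        have hSK := (htake _).mp hSs
        have hSn : Nat.findGreatest (fun j => (cs.take L)[j]? = some '/') (cs.take L).length
            ≤ (cs.take L).length := Nat.findGreatest_le _
        by_contra hcon
        rw [not_le] at hcon
        have hKS : K < Nat.findGreatest (fun j => (cs.take L)[j]? = some '/')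
            (cs.take L).length := by exact_mod_cast hcon
        exact hKmax _ hKS (by omega)
          ⟨by omega, Or.inr ⟨hSK.2, ⟨L, by omega, hSK.1, hLs⟩⟩⟩
      · omega
    rcases hKgood.2 with hc | ⟨hsK, hsaK⟩
    · -- A returns at a colon: the colon component attains K
      have hge : (K : Int) ≤ PySem.Chars.rfind cs [':'] := by
        rw [rfind_single, if_pos ⟨K, by omega, hc⟩]
        exact_mod_cast Nat.le_findGreatest (by omega) hc
      exact le_antisymm (max_le hsec_le hcol_le) (le_trans hge (le_max_right _ _))
    · -- A returns at a slash with a slash to its right: the second component attains K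
      obtain ⟨j, hj, hKj, hjs⟩ := hsaK
      have hjL : j ≤ L := Nat.le_findGreatest hj hjs
      have hKL : K < L := by omega
      have htK : (cs.take L)[K]? = some '/' := (htake K).mpr ⟨hKL, hsK⟩
      have hge : (K : Int) ≤ PySem.Chars.rfind (cs.take L) ['/'] := by
        rw [rfind_single, if_pos ⟨K, by omega, htK⟩]
        exact_mod_cast Nat.le_findGreatest (by omega) htK
      exact le_antisymm (max_le hsec_le hcol_le) (le_trans hge (le_max_left _ _))
  · -- no slash at all: last = -1, second = -1, A must return at a colon
    have hlast : PySem.Chars.rfind cs ['/'] = -1 := by rw [rfind_single, if_neg hS]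
    rw [hlast, if_neg (by simp)]
    rcases hKgood.2 with hc | ⟨hsK, -⟩
    · have hge : (K : Int) ≤ PySem.Chars.rfind cs [':'] := by
        rw [rfind_single, if_pos ⟨K, by omega, hc⟩]
        exact_mod_cast Nat.le_findGreatest (by omega) hc
      exact le_antisymm (max_le (by omega) hcol_le) (le_trans hge (le_max_right _ _))
    · exact absurd ⟨K, by omega, hsK⟩ hS

-- ===== VERDICT (by name: the statement is the Claim_ definition above) =====
theorem get_slug_from_url_py_spec : Claim_equal_get_slug_from_url_py := by
  intro url _dom hpre
  show get_slug_from_url_py url = get_slug_from_url_py_alt url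
  obtain ⟨k, hk, hkgood⟩ := hpre
  have hkn : k < url.toList.length := goodIdx_lt _ _ hkgood
  set cs := url.toList with hcs
  set K := Nat.findGreatest (goodIdx cs) cs.length with hK
  have hKgood : goodIdx cs K := Nat.findGreatest_spec hk hkgood
  have hKlt : K < cs.length := goodIdx_lt _ _ hKgood
  -- A's side
  have hn1 : cs.length - 1 < cs.length := by omega
  have hflag0 : (false = true) ↔ slashAbove cs (cs.length - 1) := by
    simp only [Bool.false_eq_true, false_iff]
    rintro ⟨j, hj, hij, hjs⟩
    have : j = cs.length := by omega
    rw [this] at hjs; simp at hjs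
  have hFGeq : Nat.findGreatest (goodIdx cs) (cs.length - 1) = K := by
    apply le_antisymm
    · by_contra hcon
      rw [not_le] at hcon
      have hspec : goodIdx cs (Nat.findGreatest (goodIdx cs) (cs.length - 1)) :=
        Nat.findGreatest_spec (by omega : k ≤ cs.length - 1) hkgood
      exact Nat.findGreatest_is_greatest hcon
        (le_trans (Nat.findGreatest_le _) (by omega)) hspec
    · exact Nat.le_findGreatest (by omega) hKgood
  have hA : get_slug_from_url_py url = String.ofList (cs.drop (K + 1)) := by
    unfold get_slug_from_url_py
    rw [← hcs, aLoop_spec cs (cs.length - 1) hn1 false hflag0,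
      if_pos ⟨k, by omega, hkgood⟩, hFGeq]
  -- B's side
  have hslash : ("/" : String).toList = ['/'] := rfl
  have hcolonL : (":" : String).toList = [':'] := rfl
  have hB : get_slug_from_url_py_alt url =
      if 1 ≤ ((K : Nat) : Int)
      then String.ofList (PySem.Chars.slice cs (some (((K : Nat) : Int) + 1)) none) else "" := by
    unfold get_slug_from_url_py_alt
    simp only [PySem.Str.rfind_eq, PySem.Str.rfindFrom_eq, hslash, hcolonL, ← hcs]
    rw [boundary_eq cs ⟨k, hk, hkgood⟩]
  rw [hA, hB, if_pos (by exact_mod_cast hKgood.1)]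
  have hsl2 : PySem.Chars.slice cs (some (((K : Nat) : Int) + 1)) none = cs.drop (K + 1) := by
    rw [PySem.Chars.slice_eq_listSlice, PySem.List.slice_from cs (by omega)]
    have h2 : (((K : Nat) : Int) + 1).toNat = K + 1 := by omega
    rw [h2]
  rw [hsl2]
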